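-- pv_equiv track=rewrite | github.com/downgutzdev/Agents-Backend-MIRAI | app/workflows/generate_query.py | _aggregate_points
-- ===== SOURCE A (Python) =====
-- from typing import Optional, Dict, Any, List
--
-- def _aggregate_points(rows: List[Dict[str, Any]]) -> Dict[str, Any]:
--     """
--     Aggregate strong/weak points, comments, and themes across sessions.
--     No heavy NLP: just unique concatenation.
--     """
--     strong, weak, comments, temas = [], [], [], []
--     seen_s, seen_w, seen_c, seen_t = set(), set(), set(), set()
--     for r in rows:
--         sp = (r.get("strong_points") or "").strip()
--         wp = (r.get("weak_points") or "").strip()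
--         gc = (r.get("general_comments") or "").strip()
--         tm = (r.get("tema") or "").strip()
--         if sp and sp not in seen_s:
--             strong.append(sp); seen_s.add(sp)
--         if wp and wp not in seen_w:
--             weak.append(wp); seen_w.add(wp)
--         if gc and gc not in seen_c:
--             comments.append(gc); seen_c.add(gc)
--         if tm and tm not in seen_t:
--             temas.append(tm); seen_t.add(tm)
--     return {
--         "strong_points": " • ".join(strong),
--         "weak_points": " • ".join(weak),
--         "general_comments": " | ".join(comments),
--         # Keep 'temas' key/name for compatibility with the rest of the stack
--         "temas": " • ".join(temas) if temas else "",
--     }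
-- ===== SOURCE B (Python) =====
-- def _uniq(vals):
--     # deletion-based dedup: take the head, delete every later copy of it, repeat
--     out = []
--     while vals:
--         head = vals[0]
--         out.append(head)
--         vals = [v for v in vals[1:] if v != head]
--     return out
--
--
-- def _collect(rows, key):
--     return [v for v in ((r.get(key) or "").strip() for r in rows) if v]
--
--
-- def _aggregate_points(rows):
--     return {
--         "strong_points": " • ".join(_uniq(_collect(rows, "strong_points"))),
--         "weak_points": " • ".join(_uniq(_collect(rows, "weak_points"))),
--         "general_comments": " | ".join(_uniq(_collect(rows, "general_comments"))),
--         # Keep 'temas' key/name for compatibility with the rest of the stack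
--         "temas": " • ".join(_uniq(_collect(rows, "tema"))),
--     }
-- ===== Notes on version B (the rewrite author's own statement) =====
-- stated objective: alternative
-- what changed: Replaces A's single fused loop with four parallel seen-sets by a per-field pipeline: collect stripped non-empty values, then deduplicate with a deletion-based algorithm (take the head, filter out all its later copies, repeat) that keeps no auxiliary seen structure at all.
import Mathlib
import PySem

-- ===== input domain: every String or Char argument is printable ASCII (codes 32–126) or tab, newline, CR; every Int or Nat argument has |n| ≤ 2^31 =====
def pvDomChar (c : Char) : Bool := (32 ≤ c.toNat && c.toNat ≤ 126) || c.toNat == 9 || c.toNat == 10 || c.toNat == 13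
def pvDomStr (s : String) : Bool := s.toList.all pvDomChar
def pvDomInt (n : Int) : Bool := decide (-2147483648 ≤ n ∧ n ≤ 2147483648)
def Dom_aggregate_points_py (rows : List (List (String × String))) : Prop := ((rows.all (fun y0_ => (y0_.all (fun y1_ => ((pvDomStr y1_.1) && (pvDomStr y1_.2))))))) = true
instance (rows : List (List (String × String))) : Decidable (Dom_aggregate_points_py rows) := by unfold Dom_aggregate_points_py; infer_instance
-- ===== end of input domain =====

-- B replaces A's single fused loop with four parallel seen-sets by a per-field pipeline:
-- collect stripped non-empty values, then deduplicate by repeatedly taking the head and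
-- deleting all its later copies — no auxiliary seen structure (alternative algorithm).

-- ===== PORT A =====
-- r.get(key): association-list dict, first-match lookup; (… or "") keeps "" for both misses and "".
def pvGetStrip (r : List (String × String)) (key : String) : String :=
  PySem.Str.strip (((PySem.Dict.mk r).get? key).getD "")

def aggregate_points_py (rows : List (List (String × String))) : List (String × String) :=
  let st := rows.foldl
    (fun (st : List String × List String × List String × List String ×
               PySem.Set String × PySem.Set String × PySem.Set String × PySem.Set String) r =>
      let (strong, weak, comments, temas, seen_s, seen_w, seen_c, seen_t) := st
      let sp := pvGetStrip r "strong_points"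
      let wp := pvGetStrip r "weak_points"
      let gc := pvGetStrip r "general_comments"
      let tm := pvGetStrip r "tema"
      let (strong, seen_s) :=
        if sp != "" && !(PySem.Set.contains seen_s sp) then (strong ++ [sp], PySem.Set.add seen_s sp)
        else (strong, seen_s)
      let (weak, seen_w) :=
        if wp != "" && !(PySem.Set.contains seen_w wp) then (weak ++ [wp], PySem.Set.add seen_w wp)
        else (weak, seen_w)
      let (comments, seen_c) :=
        if gc != "" && !(PySem.Set.contains seen_c gc) then (comments ++ [gc], PySem.Set.add seen_c gc)
        else (comments, seen_c)
      let (temas, seen_t) :=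
        if tm != "" && !(PySem.Set.contains seen_t tm) then (temas ++ [tm], PySem.Set.add seen_t tm)
        else (temas, seen_t)
      (strong, weak, comments, temas, seen_s, seen_w, seen_c, seen_t))
    ([], [], [], [], PySem.Set.empty, PySem.Set.empty, PySem.Set.empty, PySem.Set.empty)
  let (strong, weak, comments, temas, _, _, _, _) := st
  [("strong_points", PySem.Str.join " • " strong),
   ("weak_points", PySem.Str.join " • " weak),
   ("general_comments", PySem.Str.join " | " comments),
   ("temas", if temas != [] then PySem.Str.join " • " temas else "")]

-- ===== PORT B =====
-- deletion-based dedup: take the head, delete every later copy of it, repeat (Source B's while loop)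
def pvUniq : List String → List String
  | [] => []
  | x :: xs => x :: pvUniq (xs.filter (fun v => v != x))
termination_by l => l.length
decreasing_by
  simpa using Nat.lt_succ_of_le (List.length_filter_le _ _)

def pvCollect (rows : List (List (String × String))) (key : String) : List String :=
  (rows.map (fun r => PySem.Str.strip (((PySem.Dict.mk r).get? key).getD ""))).filter
    (fun v => v != "")

def aggregate_points_py_alt (rows : List (List (String × String))) : List (String × String) :=
  [("strong_points", PySem.Str.join " • " (pvUniq (pvCollect rows "strong_points"))),
   ("weak_points", PySem.Str.join " • " (pvUniq (pvCollect rows "weak_points"))),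
   ("general_comments", PySem.Str.join " | " (pvUniq (pvCollect rows "general_comments"))),
   ("temas", PySem.Str.join " • " (pvUniq (pvCollect rows "tema")))]

-- ===== PRECONDITION & SPEC =====
def Spec_aggregate_points_py (rows : List (List (String × String))) (out : List (String × String)) : Prop := out = aggregate_points_py_alt rows
instance (rows : List (List (String × String))) (out : List (String × String)) : Decidable (Spec_aggregate_points_py rows out) := by unfold Spec_aggregate_points_py; infer_instance

-- ===== CLAIM =====
def Claim_equal_aggregate_points_py : Prop := ∀ (rows : List (List (String × String))), Dom_aggregate_points_py rows → Spec_aggregate_points_py rows (aggregate_points_py rows)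

-- ===== LEMMAS AND PROOFS =====

-- one field of A's loop body
def pvStep (st : List String × PySem.Set String) (v : String) : List String × PySem.Set String :=
  if v != "" && !(PySem.Set.contains st.2 v) then (st.1 ++ [v], PySem.Set.add st.2 v) else st

-- A's 8-tuple fold decomposes into four independent per-field folds over the mapped values
theorem pv_fold_decompose (rows : List (List (String × String)))
    (s w c t : List String) (ss sw sc st : PySem.Set String) :
    rows.foldl
      (fun (st : List String × List String × List String × List String ×
                 PySem.Set String × PySem.Set String × PySem.Set String × PySem.Set String) r =>
        let (strong, weak, comments, temas, seen_s, seen_w, seen_c, seen_t) := st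
        let sp := pvGetStrip r "strong_points"
        let wp := pvGetStrip r "weak_points"
        let gc := pvGetStrip r "general_comments"
        let tm := pvGetStrip r "tema"
        let (strong, seen_s) :=
          if sp != "" && !(PySem.Set.contains seen_s sp) then (strong ++ [sp], PySem.Set.add seen_s sp)
          else (strong, seen_s)
        let (weak, seen_w) :=
          if wp != "" && !(PySem.Set.contains seen_w wp) then (weak ++ [wp], PySem.Set.add seen_w wp)
          else (weak, seen_w)
        let (comments, seen_c) :=
          if gc != "" && !(PySem.Set.contains seen_c gc) then (comments ++ [gc], PySem.Set.add seen_c gc)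
          else (comments, seen_c)
        let (temas, seen_t) :=
          if tm != "" && !(PySem.Set.contains seen_t tm) then (temas ++ [tm], PySem.Set.add seen_t tm)
          else (temas, seen_t)
        (strong, weak, comments, temas, seen_s, seen_w, seen_c, seen_t))
      (s, w, c, t, ss, sw, sc, st)
    =
    (let a := (rows.map (fun r => pvGetStrip r "strong_points")).foldl pvStep (s, ss)
     let b := (rows.map (fun r => pvGetStrip r "weak_points")).foldl pvStep (w, sw)
     let d := (rows.map (fun r => pvGetStrip r "general_comments")).foldl pvStep (c, sc)
     let e := (rows.map (fun r => pvGetStrip r "tema")).foldl pvStep (t, st)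
     (a.1, b.1, d.1, e.1, a.2, b.2, d.2, e.2)) := by
  induction rows generalizing s w c t ss sw sc st with
  | nil => rfl
  | cons r rs ih =>
      simp only [List.foldl_cons, List.map_cons]
      rw [ih]
      simp only [pvStep]

-- with seen = list, one field's fold is the ordered dedup of the nonempty values
theorem pv_field (vs : List String) (acc : List String) :
    vs.foldl pvStep (acc, acc) =
      ((vs.filter (fun v => v != "")).foldl PySem.Set.add acc,
       (vs.filter (fun v => v != "")).foldl PySem.Set.add acc) := by
  induction vs generalizing acc with
  | nil => rfl
  | cons v vs ih =>
      simp only [List.foldl_cons, List.filter_cons, pvStep]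
      by_cases hv : v = ""
      · simp [hv, ih]
      · simp only [PySem.Set.contains] at *
        by_cases hc : v ∈ acc
        · simp [hv, hc, PySem.Set.add, PySem.Set.contains, ih]
        · simp [hv, hc, PySem.Set.add, PySem.Set.contains, ih]

theorem pv_field_dedup (vs : List String) :
    (vs.foldl pvStep ([], [])).1 = PySem.List.dedup (vs.filter (fun v => v != "")) := by
  rw [pv_field]
  simp [PySem.List.dedup_eq_ofList, PySem.Set.ofList_eq_foldl]

-- filtering out an element already in the accumulator does not change the Set fold
theorem pv_foldl_add_filter (xs : List String) (acc : List String) (x : String) (hx : x ∈ acc) :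
    (xs.filter (fun v => v != x)).foldl PySem.Set.add acc = xs.foldl PySem.Set.add acc := by
  induction xs generalizing acc with
  | nil => rfl
  | cons v vs ih =>
      by_cases hv : v = x
      · subst hv
        have hadd : PySem.Set.add acc v = acc := by
          simp [PySem.Set.add, PySem.Set.contains, hx]
        simp [List.foldl_cons, hadd, ih acc hx]
      · simp only [List.filter_cons, hv, bne_iff_ne, ne_eq, not_false_eq_true, if_pos,
          List.foldl_cons]
        exact ih _ (by simp [PySem.Set.add, PySem.Set.contains]; split <;> simp [hx])

-- the head can be pulled out of the accumulator when it never recurs in the list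
theorem pv_foldl_add_cons (xs : List String) (acc : List String) (x : String) (hx : x ∉ xs) :
    xs.foldl PySem.Set.add (x :: acc) = x :: xs.foldl PySem.Set.add acc := by
  induction xs generalizing acc with
  | nil => rfl
  | cons v vs ih =>
      have hvx : v ≠ x := fun h => hx (h ▸ List.mem_cons_self)
      have hvs : x ∉ vs := fun h => hx (List.mem_cons_of_mem _ h)
      simp only [List.foldl_cons, PySem.Set.add, PySem.Set.contains]
      by_cases hc : v ∈ acc
      · simp [hc, hvx, ih _ hvs]
      · simp [hc, hvx, ih _ hvs]

-- B's deletion-based dedup computes the ordered first-occurrence dedup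
theorem pvUniq_eq_dedup_aux (n : Nat) : ∀ (l : List String), l.length ≤ n → pvUniq l = PySem.List.dedup l := by
  induction n with
  | zero =>
      intro l h
      have : l = [] := List.eq_nil_of_length_eq_zero (Nat.le_zero.mp h)
      subst this
      rw [show pvUniq [] = [] by simp [pvUniq]]; rfl
  | succ n ih =>
      intro l h
      cases l with
      | nil => rw [show pvUniq [] = [] by simp [pvUniq]]; rfl
      | cons x xs =>
          have hx : x ∉ xs.filter (fun v => v != x) := by simp
          have hlen : (xs.filter (fun v => v != x)).length ≤ n :=
            le_trans (List.length_filter_le _ _) (Nat.succ_le_succ_iff.mp h)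
          rw [show pvUniq (x :: xs) = x :: pvUniq (xs.filter (fun v => v != x)) by
            simp [pvUniq]]
          rw [ih _ hlen]
          simp only [PySem.List.dedup_eq_ofList, PySem.Set.ofList_eq_foldl, List.foldl_cons]
          have h0 : (PySem.Set.add ([] : List String) x) = [x] := by
            simp [PySem.Set.add, PySem.Set.contains]
          rw [h0, ← pv_foldl_add_filter xs [x] x (by simp)]
          rw [show ([x] : List String) = x :: [] from rfl, pv_foldl_add_cons _ _ _ hx]

theorem pvUniq_eq_dedup (l : List String) : pvUniq l = PySem.List.dedup l :=
  pvUniq_eq_dedup_aux l.length l le_rfl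

theorem pv_join_if (sep : String) (l : List String) :
    (if l != [] then PySem.Str.join sep l else "") = PySem.Str.join sep l := by
  cases l with
  | nil => simp [PySem.Str.join]
  | cons x xs => simp

-- ===== VERDICT =====
theorem aggregate_points_py_spec : Claim_equal_aggregate_points_py := by
  intro rows _
  show aggregate_points_py rows = aggregate_points_py_alt rows
  unfold aggregate_points_py aggregate_points_py_alt
  rw [show (PySem.Set.empty : PySem.Set String) = ([] : List String) from rfl]
  rw [pv_fold_decompose]
  simp only [pv_field_dedup, pvUniq_eq_dedup, pvCollect]
  rw [pv_join_if]
  simp [pvGetStrip]
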